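-- pv_equiv track=rewrite | github.com/pypi-data/pypi-mirror-320 | packages/xbase-util/xbase_util-0.8.8.tar.gz/xbase_util-0.8.8/xbase_util/pcap_util.py | group_numbers
-- ===== SOURCE A (Python) =====
-- def group_numbers(nums):
--     result = []
--     for num in nums:
--         if num < 0:
--             result.append([num])
--         elif result:
--             result[-1].append(num)
--     return result
-- ===== SOURCE B (Python) =====
-- def group_numbers(nums):
--     # Single reversed pass: accumulate the current group (reversed) by appending,
--     # close a group when a negative is met; leading non-negatives are discarded.
--     groups = []
--     cur = []
--     for x in reversed(list(nums)):
--         if x < 0: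
--             cur.append(x)
--             groups.append(cur[::-1])
--             cur = []
--         else:
--             cur.append(x)
--     groups.reverse()
--     return groups
-- ===== Notes on version B (the rewrite author's own statement) =====
-- stated objective: alternative
-- what changed: B traverses the list once in reverse, prepending to the current group and closing it at each negative, instead of A's forward loop that mutates the last group of the result in place.
import Mathlib
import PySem

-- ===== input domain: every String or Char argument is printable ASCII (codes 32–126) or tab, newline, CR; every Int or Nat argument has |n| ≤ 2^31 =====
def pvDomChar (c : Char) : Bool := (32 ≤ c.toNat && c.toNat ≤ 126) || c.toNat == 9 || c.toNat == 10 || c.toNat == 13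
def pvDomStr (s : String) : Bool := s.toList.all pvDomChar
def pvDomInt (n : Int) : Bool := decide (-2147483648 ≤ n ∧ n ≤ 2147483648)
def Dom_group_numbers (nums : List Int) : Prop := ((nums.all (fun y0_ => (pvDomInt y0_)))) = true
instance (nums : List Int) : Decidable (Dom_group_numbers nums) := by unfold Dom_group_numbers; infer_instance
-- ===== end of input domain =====

-- B replaces A's forward loop (which mutates the last group in place) by a single
-- reversed pass that closes a group at each negative; same return value, no mutation.

-- ===== PORT A =====
-- one loop step of A: append [num] on a negative, else append num to the last group (if any)
def groupStepA (result : List (List Int)) (num : Int) : List (List Int) :=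
  if num < 0 then result ++ [[num]]
  else if result.isEmpty then result
  else result.dropLast ++ [(result.getLastD []) ++ [num]]

def group_numbers (nums : List Int) : List (List Int) :=
  nums.foldl groupStepA []

-- ===== PORT B =====
-- the reversed loop of Source B: state = (closed groups, current group reversed);
-- iterating over reversed(list(nums)) is a foldl over nums.reverse; the final
-- 'groups.reverse()' is the outer .reverse
def groupStepB (p : List (List Int) × List Int) (x : Int) : List (List Int) × List Int :=
  if x < 0 then (p.1 ++ [(p.2 ++ [x]).reverse], [])
  else (p.1, p.2 ++ [x])

def group_numbers_alt (nums : List Int) : List (List Int) :=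
  ((nums.reverse.foldl groupStepB ([], [])).1).reverse

-- ===== PRECONDITION & SPEC =====
def Spec_group_numbers (nums : List Int) (out : List (List Int)) : Prop := out = group_numbers_alt nums
instance (nums : List Int) (out : List (List Int)) : Decidable (Spec_group_numbers nums out) := by unfold Spec_group_numbers; infer_instance

-- ===== CLAIM (what is proved, stated in full; the proofs are below) =====
def Claim_equal_group_numbers : Prop := ∀ (nums : List Int), Dom_group_numbers nums → Spec_group_numbers nums (group_numbers nums)

-- ===== LEMMAS AND PROOFS =====

-- proof-only intermediate: B's loop with prepending instead of append+reverse
def groupStepR (x : Int) (p : List (List Int) × List Int) : List (List Int) × List Int :=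
  if x < 0 then ((x :: p.2) :: p.1, []) else (p.1, x :: p.2)

-- Invariant: with F l = foldr groupStepR ([],[]) l, A's fold from [] returns (F l).1,
-- and from a non-empty accumulator acc ++ [g] it returns acc ++ (g ++ (F l).2) :: (F l).1.
theorem group_numbers_key (l : List Int) :
    (List.foldl groupStepA [] l = (List.foldr groupStepR ([], []) l).1) ∧
    (∀ (acc : List (List Int)) (g : List Int),
      List.foldl groupStepA (acc ++ [g]) l
        = acc ++ (g ++ (List.foldr groupStepR ([], []) l).2) :: (List.foldr groupStepR ([], []) l).1) := by
  induction l with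
  | nil => simp
  | cons x xs ih =>
    obtain ⟨ih1, ih2⟩ := ih
    by_cases hx : x < 0
    · constructor
      · have h := ih2 [] [x]
        simp only [List.foldl_cons, List.foldr_cons, groupStepA, groupStepR, if_pos hx,
          List.nil_append] at h ⊢
        simpa using h
      · intro acc g
        have h := ih2 (acc ++ [g]) [x]
        simp only [List.foldl_cons, List.foldr_cons, groupStepA, groupStepR, if_pos hx,
          List.append_assoc] at h ⊢
        simpa using h
    · constructor
      · simp only [List.foldl_cons, List.foldr_cons, groupStepA, groupStepR, if_neg hx]
        simpa using ih1
      · intro acc g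
        have h := ih2 acc (g ++ [x])
        simp only [List.foldl_cons, List.foldr_cons, groupStepA, groupStepR, if_neg hx,
          List.isEmpty_iff, List.dropLast_concat, List.getLastD_concat] at h ⊢
        simp only [List.append_assoc] at h ⊢
        simpa using h

-- Bridge: B's append-and-reverse state is the componentwise reverse of groupStepR's state.
theorem group_numbers_bridge (l : List Int) :
    List.foldr (fun x p => groupStepB p x) ([], []) l
      = ((List.foldr groupStepR ([], []) l).1.reverse,
         (List.foldr groupStepR ([], []) l).2.reverse) := by
  induction l with
  | nil => simp
  | cons x xs ih =>
    rw [List.foldr_cons, List.foldr_cons, ih]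
    by_cases hx : x < 0 <;> simp [groupStepB, groupStepR, hx]

-- ===== VERDICT (by name: the statement is the Claim_ definition above) =====
theorem group_numbers_spec : Claim_equal_group_numbers := by
  intro nums _
  unfold Spec_group_numbers group_numbers group_numbers_alt
  rw [List.foldl_reverse, group_numbers_bridge, List.reverse_reverse]
  exact (group_numbers_key nums).1
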